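-- pv_equiv track=rewrite | github.com/tlucanti/contest | Codeforces/div21/D1.py | mm_gen
-- ===== SOURCE A (Python) =====
-- def mm_gen(a):
--     n = len(a)
--     mx = [0] * n
--     mn = [0] * n
--
--     m = a[0]
--     mi = 0
--     cnt = 1
--     for i in range(1, n):
--         if a[i] < m:
--             cnt += 1
--         else:
--             for j in range(cnt):
--                 mx[mi + j] = j
--             mi = i
--             cnt = 1
--             m = a[i]
--     for j in range(cnt):
--         mx[mi + j] = j
--
--     m = a[-1]
--     mi = n - 1
--     cnt = 1
--     for i in range(n - 1, -1, -1):
--         if a[i] > m: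
--             cnt += 1
--         else:
--             for j in range(cnt):
--                 mn[mi - j] = j
--             mi = i
--             cnt = 1
--             m = a[i]
--     for j in range(cnt):
--         mn[mi - j] = j
--     return mx, mn
-- ===== SOURCE B (Python) =====
-- def mm_gen(a):
--     if not a:
--         return [], []
--     mx = [0]
--     m = a[0]
--     for x in a[1:]:
--         if x < m:
--             mx.append(mx[-1] + 1)
--         else:
--             mx.append(0)
--             m = x
--     mnr = [0]
--     m = a[-1]
--     for x in reversed(a[:-1]):
--         if x > m:
--             mnr.append(mnr[-1] + 1)
--         else:
--             mnr.append(0)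
--             m = x
--     mnr.reverse()
--     return mx, mnr
-- ===== Notes on version B (the rewrite author's own statement) =====
-- stated objective: simpler
-- what changed: Each array is produced in one flat pass that carries a running offset (mx[i]=mx[i-1]+1 or 0; symmetrically backward), replacing A's buffered segment counter with nested flush loops that rewrite offsets into a preallocated array.
import Mathlib
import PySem

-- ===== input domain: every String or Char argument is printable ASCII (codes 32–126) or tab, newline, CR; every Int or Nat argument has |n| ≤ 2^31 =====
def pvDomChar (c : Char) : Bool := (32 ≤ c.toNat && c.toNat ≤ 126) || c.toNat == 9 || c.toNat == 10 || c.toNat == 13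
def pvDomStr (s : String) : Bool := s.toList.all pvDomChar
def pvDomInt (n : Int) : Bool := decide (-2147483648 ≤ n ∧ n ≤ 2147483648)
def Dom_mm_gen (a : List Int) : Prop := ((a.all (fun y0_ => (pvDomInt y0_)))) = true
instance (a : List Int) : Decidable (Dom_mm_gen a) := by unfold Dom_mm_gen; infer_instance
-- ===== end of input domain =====

-- B replaces A's buffered segment counter (with nested flush loops rewriting a preallocated
-- array) by single flat passes carrying a running offset; equivalence proved on nonempty lists.

-- ===== PORT A =====
-- Literal port of A.  Array writes mx[mi+j] = j become List.set; the written indices are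
-- in range and nonnegative on every input admitted by Pre_, so '.toNat' is exact there.
-- a[i] / a[-1] are read with pyGetD (in range under Pre_, so the default is never used).
def mm_gen (a : List Int) : List Int × List Int :=
  let n : Int := (a.length : Int)
  let mx : List Int := List.replicate a.length 0
  let mn : List Int := List.replicate a.length 0
  let s1 := (PySem.List.pyRange 1 n 1).foldl
    (fun (st : List Int × Int × Int × Int) i =>
      match st with
      | (mx, m, mi, cnt) =>
        if PySem.List.pyGetD a i 0 < m then (mx, m, mi, cnt + 1)
        else ((PySem.List.pyRange 0 cnt 1).foldl (fun mx j => mx.set (mi + j).toNat j) mx,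
              PySem.List.pyGetD a i 0, i, 1))
    (mx, PySem.List.pyGetD a 0 0, 0, 1)
  let mx := (PySem.List.pyRange 0 s1.2.2.2 1).foldl
    (fun mx j => mx.set (s1.2.2.1 + j).toNat j) s1.1
  let s2 := (PySem.List.pyRange (n - 1) (-1) (-1)).foldl
    (fun (st : List Int × Int × Int × Int) i =>
      match st with
      | (mn, m, mi, cnt) =>
        if PySem.List.pyGetD a i 0 > m then (mn, m, mi, cnt + 1)
        else ((PySem.List.pyRange 0 cnt 1).foldl (fun mn j => mn.set (mi - j).toNat j) mn,
              PySem.List.pyGetD a i 0, i, 1))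
    (mn, PySem.List.pyGetD a (-1) 0, n - 1, 1)
  let mn := (PySem.List.pyRange 0 s2.2.2.2 1).foldl
    (fun mn j => mn.set (s2.2.2.1 - j).toNat j) s2.1
  (mx, mn)

-- ===== PORT B =====
-- Port of Source B.  Python's list.append is modelled by consing onto a reversed accumulator
-- (mx[-1] = head); the forward list is reversed at the end, the backward one — which
-- Python builds back-to-front and then reverses — is therefore already in final order.
def mm_gen_alt (a : List Int) : List Int × List Int :=
  match a with
  | [] => ([], [])
  | a0 :: rest =>
    let s1 := rest.foldl
      (fun (st : List Int × Int) x =>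
        if x < st.2 then ((st.1.headD 0 + 1) :: st.1, st.2) else ((0 : Int) :: st.1, x))
      ([0], a0)
    let s2 := a.dropLast.reverse.foldl
      (fun (st : List Int × Int) x =>
        if x > st.2 then ((st.1.headD 0 + 1) :: st.1, st.2) else ((0 : Int) :: st.1, x))
      ([0], a.reverse.headD 0)
    (s1.1.reverse, s2.1)

-- ===== PRECONDITION & SPEC =====
-- Pre_ excludes exactly the empty list, on which A raises IndexError (a[0]).
def Pre_mm_gen (a : List Int) : Prop := a ≠ []
instance (a : List Int) : Decidable (Pre_mm_gen a) := by unfold Pre_mm_gen; infer_instance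
def pvWitness_mm_gen : List Int := [3, 1, 2]

def Spec_mm_gen (a : List Int) (out : List Int × List Int) : Prop := out = mm_gen_alt a
instance (a : List Int) (out : List Int × List Int) : Decidable (Spec_mm_gen a out) := by
  unfold Spec_mm_gen; infer_instance

-- ===== CLAIM (what is proved, stated in full; the proofs are below) =====
def Claim_equal_mm_gen : Prop :=
  ∀ (a : List Int), Dom_mm_gen a → Pre_mm_gen a → Spec_mm_gen a (mm_gen a)

-- ===== LEMMAS AND PROOFS =====

lemma set_length_append (l r : List Int) (x v : Int) :
    (l ++ x :: r).set l.length v = l ++ v :: r := by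
  induction l with
  | nil => simp
  | cons h t ih => simp [ih]

-- Flushing forward: writing 0..c-1 at positions F.length .. F.length+c-1 of F ++ zeros.
lemma flush_fwd (F : List Int) (c t : Nat) (hct : c ≤ t) (mi : Int)
    (hmi : mi = (F.length : Int)) :
    (PySem.List.pyRange 0 (c : Int) 1).foldl (fun l j => l.set (mi + j).toNat j)
      (F ++ List.replicate t 0)
    = F ++ (List.range c).map (fun j => (j : Int)) ++ List.replicate (t - c) 0 := by
  subst hmi
  induction c with
  | zero => simp [PySem.List.pyRange_one_eq_nil]
  | succ c ih =>
    rw [show (((c + 1 : Nat)) : Int) = (c : Int) + 1 by push_cast; ring,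
        PySem.List.pyRange_one_succ_right (by positivity), List.foldl_append,
        ih (by omega)]
    simp only [List.foldl_cons, List.foldl_nil]
    have hrep : List.replicate (t - c) (0 : Int) = 0 :: List.replicate (t - (c + 1)) 0 := by
      rw [show t - c = (t - (c + 1)) + 1 by omega, List.replicate_succ]
    have hidx : (((F.length : Int)) + (c : Int)).toNat
        = (F ++ (List.range c).map (fun j => (j : Int))).length := by
      simp; omega
    rw [hrep, hidx, set_length_append]
    simp [List.range_succ]

-- Flushing backward: writing 0..c-1 at positions p, p-1, .., p+1-c of replicate (p+1) 0 ++ S.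
lemma flush_bwd (S : List Int) (p c : Nat) (hc : c ≤ p + 1) (mi : Int) (hmi : mi = (p : Int)) :
    (PySem.List.pyRange 0 (c : Int) 1).foldl (fun l j => l.set (mi - j).toNat j)
      (List.replicate (p + 1) 0 ++ S)
    = List.replicate (p + 1 - c) 0 ++ ((List.range c).map (fun j => (j : Int))).reverse ++ S := by
  subst hmi
  induction c with
  | zero => simp [PySem.List.pyRange_one_eq_nil]
  | succ c ih =>
    rw [show (((c + 1 : Nat)) : Int) = (c : Int) + 1 by push_cast; ring,
        PySem.List.pyRange_one_succ_right (by positivity), List.foldl_append,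
        ih (by omega)]
    simp only [List.foldl_cons, List.foldl_nil]
    have hrep : List.replicate (p + 1 - c) (0 : Int)
        = List.replicate (p - c) 0 ++ [(0 : Int)] := by
      rw [show p + 1 - c = (p - c) + 1 by omega, List.replicate_succ']
    have hidx : (((p : Int)) - (c : Int)).toNat = (List.replicate (p - c) (0 : Int)).length := by
      simp
    rw [hrep, hidx, List.append_assoc, List.append_assoc, List.singleton_append,
        set_length_append]
    simp [List.range_succ]

lemma loop_fwd (a : List Int) :
    ∀ (rest : List Int) (k : Nat) (mxr : List Int) (m : Int) (c : Nat),
      1 ≤ k → k ≤ a.length → a.drop k = rest → 1 ≤ c → c ≤ k → mxr.length = k →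
      mxr.reverse.drop (k - c) = (List.range c).map (fun j => (j : Int)) →
      mxr.headD 0 = (c : Int) - 1 →
      (let sA := (PySem.List.pyRange (k : Int) (a.length : Int) 1).foldl
          (fun (st : List Int × Int × Int × Int) i =>
            match st with
            | (mx, m, mi, cnt) =>
              if PySem.List.pyGetD a i 0 < m then (mx, m, mi, cnt + 1)
              else ((PySem.List.pyRange 0 cnt 1).foldl (fun mx j => mx.set (mi + j).toNat j) mx,
                    PySem.List.pyGetD a i 0, i, 1))
          (mxr.reverse.take (k - c) ++ List.replicate (a.length - (k - c)) 0, m,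
            (k : Int) - (c : Int), (c : Int));
        (PySem.List.pyRange 0 sA.2.2.2 1).foldl
          (fun mx j => mx.set (sA.2.2.1 + j).toNat j) sA.1)
      = (rest.foldl
          (fun (st : List Int × Int) x =>
            if x < st.2 then ((st.1.headD 0 + 1) :: st.1, st.2) else ((0 : Int) :: st.1, x))
          (mxr, m)).1.reverse := by
  intro rest
  induction rest with
  | nil =>
    intro k mxr m c h1 h2 h3 h4 h5 h6 h7 h8
    have hk : a.length ≤ k := by
      have := congrArg List.length h3; simp at this; omega
    have hk' : k = a.length := le_antisymm h2 hk
    subst hk'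
    rw [PySem.List.pyRange_one_eq_nil le_rfl]
    simp only [List.foldl_nil]
    have hF : (mxr.reverse.take (a.length - c)).length = a.length - c := by
      simp [h6]
    rw [flush_fwd _ c (a.length - (a.length - c)) (by omega) _ (by rw [hF]; omega)]
    rw [show a.length - (a.length - c) - c = 0 by omega]
    simp only [List.replicate_zero, List.append_nil]
    rw [← h7, List.take_append_drop]
  | cons x rest' ih =>
    intro k mxr m c h1 h2 h3 h4 h5 h6 h7 h8
    have hklt : k < a.length := by
      have := congrArg List.length h3; simp at this; omega
    have hx : PySem.List.pyGetD a (k : Int) 0 = x := by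
      have h0 : a[k]? = some x := by
        have hd : (a.drop k)[0]? = a[k + 0]? := List.getElem?_drop
        rw [h3] at hd; simpa using hd.symm
      simp [PySem.List.pyGetD_natCast, List.getD, h0]
    have hdrop : a.drop (k + 1) = rest' := by
      have hdd : List.drop 1 (List.drop k a) = List.drop (k + 1) a := List.drop_drop
      rw [h3] at hdd
      simpa using hdd.symm
    rw [PySem.List.pyRange_one_cons (by exact_mod_cast hklt)]
    simp only [List.foldl_cons]
    rw [hx]
    by_cases hxm : x < m
    · rw [if_pos hxm]
      have h7' : ((c : Int) :: mxr).reverse.drop (k + 1 - (c + 1))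
          = (List.range (c + 1)).map (fun j => (j : Int)) := by
        simp only [Nat.succ_sub_succ, List.reverse_cons]
        rw [List.drop_append_of_le_length (by simp [h6]), h7]
        simp [List.range_succ]
      have key := ih (k + 1) ((c : Int) :: mxr) m (c + 1) (by omega) (by omega) hdrop
        (by omega) (by omega) (by simp [h6]) h7' (by simp)
      have e1 : ((c : Int) :: mxr).reverse.take (k + 1 - (c + 1))
          = mxr.reverse.take (k - c) := by
        simp only [Nat.succ_sub_succ, List.reverse_cons]
        rw [List.take_append_of_le_length (by simp [h6])]
      rw [e1, Nat.succ_sub_succ] at key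
      rw [show (((k + 1 : Nat)) : Int) = (k : Int) + 1 by push_cast; ring,
          show (((c + 1 : Nat)) : Int) = (c : Int) + 1 by push_cast; ring] at key
      rw [show (k : Int) + 1 - ((c : Int) + 1) = (k : Int) - (c : Int) by ring] at key
      rw [key, h8]
      rw [if_pos hxm]
      ring_nf
    · rw [if_neg hxm]
      have hF : (mxr.reverse.take (k - c)).length = k - c := by
        simp [h6]
      rw [flush_fwd _ c (a.length - (k - c)) (by omega) _ (by rw [hF]; omega)]
      have hfl : mxr.reverse.take (k - c) ++ (List.range c).map (fun j => (j : Int))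
          ++ List.replicate (a.length - (k - c) - c) 0
          = ((0 : Int) :: mxr).reverse.take (k + 1 - 1)
            ++ List.replicate (a.length - (k + 1 - 1)) 0 := by
        rw [List.append_assoc, ← h7, ← List.append_assoc, List.take_append_drop]
        simp only [Nat.add_sub_cancel, List.reverse_cons]
        rw [List.take_append_of_le_length (by simp [h6])]
        rw [show a.length - (k - c) - c = a.length - k by omega]
        simp [h6]
      rw [hfl]
      have key := ih (k + 1) ((0 : Int) :: mxr) x 1 (by omega) (by omega) hdrop
        (by omega) (by omega) (by simp [h6])
        (by simp only [Nat.add_sub_cancel, List.reverse_cons]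
            rw [List.drop_append_of_le_length (by simp [h6])]
            simp [h6, List.range_succ])
        (by simp)
      rw [show (((k + 1 : Nat)) : Int) = (k : Int) + 1 by push_cast; ring] at key
      rw [show ((1 : Nat) : Int) = (1 : Int) by norm_num] at key
      rw [show (k : Int) + 1 - 1 = (k : Int) by ring] at key
      rw [key, if_neg hxm]

lemma loop_bwd (a : List Int) :
    ∀ (k : Nat) (mnr : List Int) (m : Int) (c : Nat),
      k ≤ a.length → 1 ≤ c → c ≤ mnr.length → mnr.length = a.length - k →
      mnr.headD 0 = (c : Int) - 1 →
      mnr.take c = ((List.range c).map (fun j => (j : Int))).reverse →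
      (let sA := (PySem.List.pyRange ((k : Int) - 1) (-1) (-1)).foldl
          (fun (st : List Int × Int × Int × Int) i =>
            match st with
            | (mn, m, mi, cnt) =>
              if PySem.List.pyGetD a i 0 > m then (mn, m, mi, cnt + 1)
              else ((PySem.List.pyRange 0 cnt 1).foldl (fun mn j => mn.set (mi - j).toNat j) mn,
                    PySem.List.pyGetD a i 0, i, 1))
          (List.replicate (k + c) 0 ++ mnr.drop c, m, (k : Int) + (c : Int) - 1, (c : Int));
        (PySem.List.pyRange 0 sA.2.2.2 1).foldl
          (fun mn j => mn.set (sA.2.2.1 - j).toNat j) sA.1)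
      = ((a.take k).reverse.foldl
          (fun (st : List Int × Int) x =>
            if x > st.2 then ((st.1.headD 0 + 1) :: st.1, st.2) else ((0 : Int) :: st.1, x))
          (mnr, m)).1 := by
  intro k
  induction k with
  | zero =>
    intro mnr m c h1 h2 h3 h4 h5 h6
    rw [show (((0 : Nat)) : Int) - 1 = (-1 : Int) by norm_num]
    rw [PySem.List.pyRange_neg_one_eq_nil le_rfl]
    simp only [List.foldl_nil, List.take_zero, List.reverse_nil]
    rw [show (0 : Nat) + c = (c - 1) + 1 by omega]
    rw [flush_bwd _ (c - 1) c (by omega) _ (by push_cast; omega)]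
    rw [show c - 1 + 1 - c = 0 by omega]
    simp only [List.replicate_zero, List.nil_append]
    rw [← h6, List.take_append_drop]
  | succ k ihk =>
    intro mnr m c h1 h2 h3 h4 h5 h6
    have hklt : k < a.length := by omega
    have hx : PySem.List.pyGetD a (k : Int) 0 = a[k] := PySem.List.pyGetD_ofNat a k 0 hklt
    rw [show (((k + 1 : Nat)) : Int) - 1 = ((k : Nat) : Int) by push_cast; ring]
    rw [PySem.List.pyRange_neg_one_cons (by omega)]
    rw [show List.take (k + 1) a = List.take k a ++ [a[k]] by
      rw [List.take_add_one, List.getElem?_eq_getElem hklt]; rfl]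
    rw [List.reverse_append]
    simp only [List.foldl_cons, List.reverse_singleton, List.singleton_append]
    rw [hx]
    by_cases hxm : a[k] > m
    · rw [if_pos hxm]
      have key := ihk ((c : Int) :: mnr) m (c + 1) (by omega) (by omega)
        (by simp; omega) (by simp; omega) (by push_cast; simp)
        (by rw [List.take_succ_cons, h6]; simp [List.range_succ])
      rw [show k + (c + 1) = (k + 1) + c by omega, List.drop_succ_cons] at key
      rw [show (((c + 1 : Nat)) : Int) = (c : Int) + 1 by push_cast; ring] at key
      rw [show (k : Int) + ((c : Int) + 1) - 1 = (((k + 1 : Nat)) : Int) + (c : Int) - 1 by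
        push_cast; ring] at key
      rw [key, h5]
      rw [if_pos hxm]
      ring_nf
    · rw [if_neg hxm]
      rw [show (k + 1) + c = (k + c) + 1 by omega]
      rw [flush_bwd _ (k + c) c (by omega) _ (by push_cast; ring)]
      rw [show k + c + 1 - c = k + 1 by omega]
      rw [List.append_assoc, ← h6, List.take_append_drop]
      have key := ihk ((0 : Int) :: mnr) a[k] 1 (by omega) (by omega)
        (by simp) (by simp; omega) (by simp) (by simp)
      rw [List.drop_succ_cons, List.drop_zero] at key
      rw [show (k : Int) + (((1 : Nat)) : Int) - 1 = ((k : Nat) : Int) by push_cast; ring] at key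
      rw [show (((1 : Nat)) : Int) = (1 : Int) by norm_num] at key
      rw [key]
      rw [if_neg hxm]

-- ===== VERDICT (by name: the statement is the Claim_ definition above) =====
theorem mm_gen_spec : Claim_equal_mm_gen := by
  unfold Claim_equal_mm_gen
  intro a _ hpre
  unfold Spec_mm_gen
  cases a with
  | nil => exact absurd rfl hpre
  | cons a0 rest =>
    unfold mm_gen mm_gen_alt
    dsimp only
    simp only [Prod.mk.injEq]
    constructor
    · -- forward pass
      have key := loop_fwd (a0 :: rest) rest 1 [0] a0 1 le_rfl (by simp) rfl le_rfl le_rfl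
        rfl (by simp [List.range_succ]) (by simp)
      dsimp only at key
      simpa using key
    · -- backward pass
      have hn : (a0 :: rest).length = rest.length + 1 := by simp
      have hlt : rest.length < (a0 :: rest).length := by simp
      have hlast : PySem.List.pyGetD (a0 :: rest) (-1) 0
          = (a0 :: rest)[rest.length] := by
        rw [PySem.List.pyGetD_neg_one (h := List.cons_ne_nil a0 rest)]
        rw [List.getLast_eq_getElem]
        simp
      have hgetn : PySem.List.pyGetD (a0 :: rest) ((rest.length : Int)) 0
          = (a0 :: rest)[rest.length] := PySem.List.pyGetD_ofNat _ _ _ hlt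
      have hrev : (a0 :: rest).reverse.headD 0 = (a0 :: rest)[rest.length] := by
        rw [List.headD_eq_head?, List.head?_reverse, List.getLast?_eq_getElem?]
        rw [show (a0 :: rest).length - 1 = rest.length by simp]
        rw [List.getElem?_eq_getElem hlt]
        rfl
      rw [show ((((a0 :: rest).length : Nat)) : Int) - 1 = ((rest.length : Nat) : Int) by
        rw [List.length_cons]; push_cast; ring]
      rw [PySem.List.pyRange_neg_one_cons (by omega)]
      simp only [List.foldl_cons]
      rw [hlast, hgetn, if_neg (lt_irrefl _)]
      -- the first iteration flushes a single 0 at position rest.length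
      rw [show List.replicate (a0 :: rest).length (0 : Int)
            = List.replicate (rest.length + 1) 0 ++ [] by simp [hn]]
      have hfl := flush_bwd [] rest.length 1 (by omega) ((rest.length : Int)) (by simp)
      norm_num [List.range_succ] at hfl
      simp only [List.append_nil]
      rw [hfl]
      have key := loop_bwd (a0 :: rest) rest.length [0] ((a0 :: rest)[rest.length]) 1
        (by simp) le_rfl (by simp) (by simp) (by simp) (by simp [List.range_succ])
      dsimp only at key
      rw [List.drop_succ_cons, List.drop_zero] at key
      rw [show (rest.length : Int) + ((1 : Nat) : Int) - 1 = (rest.length : Int) by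
        push_cast; ring] at key
      rw [show ((1 : Nat) : Int) = (1 : Int) by norm_num] at key
      rw [show List.replicate (rest.length + 1) (0 : Int)
            = List.replicate rest.length 0 ++ [0] from List.replicate_succ' .. ] at key
      simp only [List.append_nil] at key
      rw [key]
      rw [show (a0 :: rest).dropLast = (a0 :: rest).take rest.length by
        rw [List.dropLast_eq_take]; simp]
      rw [hrev]
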